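-- pv_equiv track=rewrite | github.com/erfanhooman/LearnLab | Data-Structure/TA-402.1/practice/p2/4.py | merge_sort_kth_element
-- ===== SOURCE A (Python) =====
-- def merge_kth_element(arr, temp_arr, left, mid, right, l, sorted_count):
--     i = left  # Starting index for left sub-array
--     j = mid + 1  # Starting index for right sub-array
--     k = left  # Starting index for the merged sub-array
--
--     # Merge the two sub-arrays
--     while i <= mid and j <= right:
--         if arr[i] <= arr[j]:
--             temp_arr[k] = arr[i]
--             i += 1
--         else:
--             temp_arr[k] = arr[j]
--             j += 1
--         k += 1
--         # Increment sorted_count for each element placed in the correct position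
--         sorted_count += 1
--         if sorted_count == l:
--             # If we've sorted the l-th element, return the current state of the array
--             return arr, True, sorted_count
--
--     # Copy remaining elements of the left sub-array, if any
--     while i <= mid:
--         temp_arr[k] = arr[i]
--         i += 1
--         k += 1
--         sorted_count += 1
--         if sorted_count == l:
--             return arr, True, sorted_count
--
--     # Copy remaining elements of the right sub-array, if any
--     while j <= right:
--         temp_arr[k] = arr[j]
--         j += 1
--         k += 1
--         sorted_count += 1
--         if sorted_count == l:
--             return arr, True, sorted_count
--
--     # Copy the merged sub-array back into the original array
--     for i in range(left, right + 1):
--         arr[i] = temp_arr[i]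
--
--     # Return False to indicate we haven't sorted the l-th element yet
--     return arr, False, sorted_count
--
-- def merge_sort_kth_element(arr, temp_arr, left, right, l, sorted_count):
--     if left < right:
--         mid = (left + right) // 2
--
--         # Sort the first half and check if the l-th element is sorted
--         arr, done, sorted_count = merge_sort_kth_element(arr, temp_arr, left, mid, l, sorted_count)
--         if done:
--             return arr, True, sorted_count
--
--         # Sort the second half and check if the l-th element is sorted
--         arr, done, sorted_count = merge_sort_kth_element(arr, temp_arr, mid + 1, right, l, sorted_count)
--         if done:
--             return arr, True, sorted_count
--
--         # Merge the two sorted halves and check if the l-th element is sorted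
--         arr, done, sorted_count = merge_kth_element(arr, temp_arr, left, mid, right, l, sorted_count)
--         if done:
--             return arr, True, sorted_count
--
--     return arr, False, sorted_count
-- ===== SOURCE B (Python) =====
-- def merge_sort_kth_element(arr, temp_arr, left, right, l, sorted_count):
--     # Iterative driver: an explicit stack replays the recursion's post-order;
--     # each merge builds the merged run as a list and copies it back by slice
--     # assignment, with the l-th-placement stop decided by a count comparison.
--     # (temp_arr is A's scratch buffer; B does not need it. Return value only.)
--     stack = [(0, left, right, 0)]  # (kind, lo, hi, mid): kind 0 = call, 1 = merge
--     while stack: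
--         kind, lo, hi, mid = stack.pop()
--         if kind == 0:
--             if lo < hi:
--                 m = (lo + hi) // 2
--                 stack.append((1, lo, hi, m))
--                 stack.append((0, m + 1, hi, 0))
--                 stack.append((0, lo, m, 0))
--         else:
--             lhs = arr[lo:mid + 1]
--             rhs = arr[mid + 1:hi + 1]
--             merged = []
--             a = b = 0
--             while a < len(lhs) and b < len(rhs):
--                 if lhs[a] <= rhs[b]:
--                     merged.append(lhs[a]); a += 1
--                 else:
--                     merged.append(rhs[b]); b += 1
--             merged += lhs[a:]
--             merged += rhs[b:]
--             count = hi - lo + 1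
--             if sorted_count < l <= sorted_count + count:
--                 return arr, True, l
--             sorted_count += count
--             arr[lo:hi + 1] = merged
--     return arr, False, sorted_count
-- ===== Notes on version B (the rewrite author's own statement) =====
-- stated objective: alternative
-- what changed: The top-down recursion is replaced by an iterative driver with an explicit stack of call/merge frames replaying the same post-order, and the element-by-element merge into temp_arr with a per-placement stop check is replaced by building the merged run as a list, deciding the l-th-placement stop by a single count comparison, and copying back via slice assignment (temp_arr is no longer used; equivalence is about the return value, A additionally mutates temp_arr in place).
-- outside the precondition, e.g. on merge_sort_kth_element([3, 1], [0, 0], -2, -1, 0, 0): A returns ([1, 3], False, 2), B returns ([3, 3, 1], False, 2); on merge_sort_kth_element([2, 1], [0], 0, 1, 1, 0): A returns ([2, 1], True, 1), B returns ([2, 1], True, 1)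
import Mathlib
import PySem

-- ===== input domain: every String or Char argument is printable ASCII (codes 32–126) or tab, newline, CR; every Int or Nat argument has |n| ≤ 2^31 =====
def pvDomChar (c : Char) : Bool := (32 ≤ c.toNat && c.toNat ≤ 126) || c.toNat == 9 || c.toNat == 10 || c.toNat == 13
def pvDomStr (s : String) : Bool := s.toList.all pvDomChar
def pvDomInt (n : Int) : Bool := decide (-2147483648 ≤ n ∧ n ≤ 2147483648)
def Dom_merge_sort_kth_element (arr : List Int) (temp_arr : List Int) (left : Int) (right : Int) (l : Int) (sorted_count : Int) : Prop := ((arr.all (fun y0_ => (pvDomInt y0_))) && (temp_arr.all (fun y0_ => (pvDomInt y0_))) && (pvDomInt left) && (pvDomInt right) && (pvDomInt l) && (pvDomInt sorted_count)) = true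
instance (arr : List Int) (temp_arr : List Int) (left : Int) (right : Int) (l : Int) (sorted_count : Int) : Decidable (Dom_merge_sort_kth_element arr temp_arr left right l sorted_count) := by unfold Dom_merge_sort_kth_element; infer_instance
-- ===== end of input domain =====

-- B replaces A's recursion by an explicit stack of frames replaying the same
-- post-order and does each merge by building the merged run and copying it back
-- by slice assignment, deciding the l-th-placement stop by a count comparison.
-- Equivalence is about the RETURN value only: A also mutates temp_arr (its
-- scratch buffer) in place, which B never touches.


-- ===== PORT A =====
-- merge_kth_element's loops; each returns (temp_arr, done, sorted_count).
-- Each loop takes a fuel argument that the call sites set to the loop's exact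
-- remaining trip count, so the fuel never expires and the loop computes exactly
-- what the Python while loop computes (fuel only makes the recursion structural).
-- third while loop: while j <= right
def pvA_loop3 (fuel : ℕ) (arr temp : List Int) (right l : Int) (j k sc : Int) : List Int × Bool × Int :=
  match fuel with
  | 0 => (temp, false, sc)
  | fuel + 1 =>
    if j ≤ right then
      let temp' := PySem.List.pySetD temp k (PySem.List.pyGetD arr j 0)
      if sc + 1 = l then (temp', true, sc + 1)
      else pvA_loop3 fuel arr temp' right l (j + 1) (k + 1) (sc + 1)
    else (temp, false, sc)

-- second while loop: while i <= mid, falling through to the third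
def pvA_loop2 (fuel : ℕ) (arr temp : List Int) (mid right l : Int) (i j k sc : Int) : List Int × Bool × Int :=
  match fuel with
  | 0 => pvA_loop3 ((right + 1 - j).toNat) arr temp right l j k sc
  | fuel + 1 =>
    if i ≤ mid then
      let temp' := PySem.List.pySetD temp k (PySem.List.pyGetD arr i 0)
      if sc + 1 = l then (temp', true, sc + 1)
      else pvA_loop2 fuel arr temp' mid right l (i + 1) j (k + 1) (sc + 1)
    else pvA_loop3 ((right + 1 - j).toNat) arr temp right l j k sc

-- first while loop: while i <= mid and j <= right, falling through to the second
def pvA_loop1 (fuel : ℕ) (arr temp : List Int) (mid right l : Int) (i j k sc : Int) : List Int × Bool × Int :=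
  match fuel with
  | 0 => pvA_loop2 ((mid + 1 - i).toNat) arr temp mid right l i j k sc
  | fuel + 1 =>
    if i ≤ mid ∧ j ≤ right then
      if PySem.List.pyGetD arr i 0 ≤ PySem.List.pyGetD arr j 0 then
        let temp' := PySem.List.pySetD temp k (PySem.List.pyGetD arr i 0)
        if sc + 1 = l then (temp', true, sc + 1)
        else pvA_loop1 fuel arr temp' mid right l (i + 1) j (k + 1) (sc + 1)
      else
        let temp' := PySem.List.pySetD temp k (PySem.List.pyGetD arr j 0)
        if sc + 1 = l then (temp', true, sc + 1)
        else pvA_loop1 fuel arr temp' mid right l i (j + 1) (k + 1) (sc + 1)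
    else pvA_loop2 ((mid + 1 - i).toNat) arr temp mid right l i j k sc

-- for i in range(left, right + 1): arr[i] = temp_arr[i]
def pvA_copyback (arr temp : List Int) (left right : Int) : List Int :=
  (PySem.List.pyRange left (right + 1) 1).foldl
    (fun a i => PySem.List.pySetD a i (PySem.List.pyGetD temp i 0)) arr

-- merge_kth_element; returns (arr, temp_arr, done, sorted_count) (temp_arr is mutated in place in Python)
def pvA_merge (arr temp : List Int) (left mid right l sc : Int) : List Int × List Int × Bool × Int :=
  match pvA_loop1 (((mid + 1 - left) + (right - mid)).toNat) arr temp mid right l left (mid + 1) left sc with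
  | (t, true, s) => (arr, t, true, s)
  | (t, false, s) => (pvA_copyback arr t left right, t, false, s)

-- merge_sort_kth_element, with the in-place state (arr, temp_arr) threaded explicitly
-- fuel bounds the recursion depth by the range width (the top call passes
-- (right - left).toNat, which never expires: each child range is strictly narrower)
def pvA_ms (fuel : ℕ) (arr temp : List Int) (left right l sc : Int) : List Int × List Int × Bool × Int :=
  match fuel with
  | 0 => (arr, temp, false, sc)
  | fuel + 1 =>
    if left < right then
      let mid := PySem.Int.floordiv (left + right) 2
      match pvA_ms fuel arr temp left mid l sc with
      | (a1, t1, true, s1) => (a1, t1, true, s1)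
      | (a1, t1, false, s1) =>
        match pvA_ms fuel a1 t1 (mid + 1) right l s1 with
        | (a2, t2, true, s2) => (a2, t2, true, s2)
        | (a2, t2, false, s2) => pvA_merge a2 t2 left mid right l s2
    else (arr, temp, false, sc)

def merge_sort_kth_element (arr : List Int) (temp_arr : List Int) (left : Int) (right : Int) (l : Int) (sorted_count : Int) : List Int × Bool × Int :=
  match pvA_ms ((right - left).toNat) arr temp_arr left right l sorted_count with
  | (a, _t, done, sc) => (a, done, sc)

-- ===== PORT B =====
-- inner two-pointer while loop of Source B building `merged`; the fuel is the exact
-- number of remaining iterations at each call site, so it never expires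
def pvB_mergeLoop (fuel : ℕ) (lhs rhs : List Int) (a b : Int) (merged : List Int) : List Int :=
  match fuel with
  | 0 => merged ++ PySem.List.slice lhs (some a) none ++ PySem.List.slice rhs (some b) none
  | fuel + 1 =>
    if a < (lhs.length : Int) ∧ b < (rhs.length : Int) then
      if PySem.List.pyGetD lhs a 0 ≤ PySem.List.pyGetD rhs b 0 then
        pvB_mergeLoop fuel lhs rhs (a + 1) b (merged ++ [PySem.List.pyGetD lhs a 0])
      else
        pvB_mergeLoop fuel lhs rhs a (b + 1) (merged ++ [PySem.List.pyGetD rhs b 0])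
    else
      merged ++ PySem.List.slice lhs (some a) none ++ PySem.List.slice rhs (some b) none

-- arr[lo:hi+1] = merged (list slice assignment)
def pvB_splice (arr : List Int) (lo hi : Int) (merged : List Int) : List Int :=
  PySem.List.slice arr none (some lo) ++ merged ++ PySem.List.slice arr (some (hi + 1)) none

-- weight of a frame, for termination of the driver loop only
def pvB_frameW (f : Int × Int × Int × Int) : Nat :=
  if f.1 = 0 then 4 ^ ((f.2.2.1 - f.2.1).toNat + 1) else 1

def pvB_stackW (stack : List (Int × Int × Int × Int)) : ℕ := (stack.map pvB_frameW).sum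

-- the driver: while stack: pop (kind, lo, hi, mid) …  (Lean list head = Python
-- list end); one fuel unit per iteration — the top call passes the stack weight,
-- which strictly dominates the iteration count, so the fuel never expires
def pvB_run (fuel : ℕ) (arr : List Int) (l sc : Int) (stack : List (Int × Int × Int × Int)) : List Int × Bool × Int :=
  match stack with
  | [] => (arr, false, sc)
  | (kind, lo, hi, mid) :: rest =>
    match fuel with
    | 0 => (arr, false, sc)
    | fuel + 1 =>
      if kind = 0 then
        if lo < hi then
          let m := PySem.Int.floordiv (lo + hi) 2
          pvB_run fuel arr l sc ((0, lo, m, 0) :: (0, m + 1, hi, 0) :: (1, lo, hi, m) :: rest)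
        else pvB_run fuel arr l sc rest
      else
        let lhs := PySem.List.slice arr (some lo) (some (mid + 1))
        let rhs := PySem.List.slice arr (some (mid + 1)) (some (hi + 1))
        let merged := pvB_mergeLoop (lhs.length + rhs.length) lhs rhs 0 0 []
        let count := hi - lo + 1
        if sc < l ∧ l ≤ sc + count then (arr, true, l)
        else pvB_run fuel (pvB_splice arr lo hi merged) l (sc + count) rest

def merge_sort_kth_element_alt (arr : List Int) (temp_arr : List Int) (left : Int) (right : Int) (l : Int) (sorted_count : Int) : List Int × Bool × Int :=
  pvB_run (pvB_stackW [(0, left, right, 0)]) arr l sorted_count [(0, left, right, 0)]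

-- ===== PRECONDITION & SPEC =====
-- Pre_ excludes calls whose index range [left, right] leaves the bounds of arr or
-- temp_arr: there A in general raises IndexError, or (with negative indices)
-- returns a value that is an artefact of Python's negative-index wraparound; a
-- few such calls still return (an early l-stop before the first out-of-range
-- write), see the cites in claim.json.
def Pre_merge_sort_kth_element (arr : List Int) (temp_arr : List Int) (left : Int) (right : Int) (l : Int) (sorted_count : Int) : Prop :=
  right ≤ left ∨ (0 ≤ left ∧ right < (arr.length : Int) ∧ right < (temp_arr.length : Int))
instance (arr : List Int) (temp_arr : List Int) (left : Int) (right : Int) (l : Int) (sorted_count : Int) : Decidable (Pre_merge_sort_kth_element arr temp_arr left right l sorted_count) := by unfold Pre_merge_sort_kth_element; infer_instance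

def pvWitness_merge_sort_kth_element : List Int × List Int × Int × Int × Int × Int := ([3, 1, 2], [0, 0, 0], 0, 2, 5, 0)

def Spec_merge_sort_kth_element (arr : List Int) (temp_arr : List Int) (left : Int) (right : Int) (l : Int) (sorted_count : Int) (out : List Int × Bool × Int) : Prop := out = merge_sort_kth_element_alt arr temp_arr left right l sorted_count
instance (arr : List Int) (temp_arr : List Int) (left : Int) (right : Int) (l : Int) (sorted_count : Int) (out : List Int × Bool × Int) : Decidable (Spec_merge_sort_kth_element arr temp_arr left right l sorted_count out) := by unfold Spec_merge_sort_kth_element; infer_instance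

-- ===== CLAIM (what is proved, stated in full; the proofs are below) =====
def Claim_equal_merge_sort_kth_element : Prop := ∀ (arr : List Int) (temp_arr : List Int) (left : Int) (right : Int) (l : Int) (sorted_count : Int), Dom_merge_sort_kth_element arr temp_arr left right l sorted_count → Pre_merge_sort_kth_element arr temp_arr left right l sorted_count → Spec_merge_sort_kth_element arr temp_arr left right l sorted_count (merge_sort_kth_element arr temp_arr left right l sorted_count)

-- ===== LEMMAS AND PROOFS =====

-- midpoint bracketing for the recursion's termination
theorem pvA_mid_lt (left right : Int) (h : left < right) :
    left ≤ PySem.Int.floordiv (left + right) 2 ∧ PySem.Int.floordiv (left + right) 2 < right := by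
  constructor
  · rw [PySem.Int.le_floordiv_iff_mul_le (by omega)]; omega
  · rw [PySem.Int.floordiv_lt_iff_lt_mul (by omega)]; omega

theorem pvB_stackW_call (lo hi m : Int) (hlo : lo < hi) (h1 : lo ≤ m) (h2 : m < hi) :
    pvB_frameW (0, lo, m, 0) + pvB_frameW (0, m + 1, hi, 0) + pvB_frameW (1, lo, hi, m)
      < pvB_frameW (0, lo, hi, 0) := by
  simp only [pvB_frameW]
  norm_num
  have e1 : (m - lo).toNat + 1 ≤ (hi - lo).toNat := by omega
  have e2 : (hi - (m + 1)).toNat + 1 ≤ (hi - lo).toNat := by omega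
  have p1 : (4:ℕ) ^ ((m - lo).toNat + 1) ≤ 4 ^ (hi - lo).toNat := Nat.pow_le_pow_right (by norm_num) e1
  have p2 : (4:ℕ) ^ ((hi - (m + 1)).toNat + 1) ≤ 4 ^ (hi - lo).toNat := Nat.pow_le_pow_right (by norm_num) e2
  have p3 : (1:ℕ) ≤ 4 ^ (hi - lo).toNat := Nat.one_le_pow _ _ (by norm_num)
  have : (4:ℕ) ^ ((hi - lo).toNat + 1) = 4 * 4 ^ (hi - lo).toNat := by ring
  omega


-- the merged run A's merge writes into temp_arr (as a function of arr's indices)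
def pvMrg (arr : List Int) (mid right i j : Int) : List Int :=
  if _hi : i ≤ mid then
    if _hj : j ≤ right then
      if PySem.List.pyGetD arr i 0 ≤ PySem.List.pyGetD arr j 0 then
        PySem.List.pyGetD arr i 0 :: pvMrg arr mid right (i + 1) j
      else
        PySem.List.pyGetD arr j 0 :: pvMrg arr mid right i (j + 1)
    else PySem.List.pyGetD arr i 0 :: pvMrg arr mid right (i + 1) j
  else
    if _hj : j ≤ right then PySem.List.pyGetD arr j 0 :: pvMrg arr mid right i (j + 1)
    else []
  termination_by (mid + 1 - i).toNat + (right + 1 - j).toNat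
  decreasing_by all_goals omega

-- the segment arr[u..v-1] read element-wise
def pvSeg (arr : List Int) (u v : Int) : List Int :=
  (PySem.List.pyRange u v 1).map (fun t => PySem.List.pyGetD arr t 0)

-- sequential overwrite of temp at positions k, k+1, …
def pvWr (temp : List Int) (k : Int) : List Int → List Int
  | [] => temp
  | x :: xs => pvWr (PySem.List.pySetD temp k x) (k + 1) xs

theorem pvWr_length (xs : List Int) : ∀ (temp : List Int) (k : Int), (pvWr temp k xs).length = temp.length := by
  induction xs with
  | nil => intro temp k; rfl
  | cons x xs ih => intro temp k; simp [pvWr, ih, PySem.List.length_pySetD]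

theorem pvSeg_cons (arr : List Int) (u v : Int) (h : u < v) :
    pvSeg arr u v = PySem.List.pyGetD arr u 0 :: pvSeg arr (u + 1) v := by
  simp [pvSeg, PySem.List.pyRange_one_cons h]

theorem pvSeg_nil (arr : List Int) (u v : Int) (h : v ≤ u) : pvSeg arr u v = [] := by
  simp [pvSeg, PySem.List.pyRange_one_eq_nil h]

theorem pvSeg_length (arr : List Int) (u v : Int) : (pvSeg arr u v).length = (v - u).toNat := by
  simp [pvSeg, PySem.List.length_pyRange_one]

theorem pvMrg_hi (arr : List Int) (mid right : Int) : ∀ (i j : Int), mid < i →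
    pvMrg arr mid right i j = pvSeg arr j (right + 1) := by
  intro i j hmi
  generalize hn : (right + 1 - j).toNat = n
  induction n generalizing j with
  | zero =>
    rw [pvMrg, dif_neg (by omega : ¬ i ≤ mid), dif_neg (by omega : ¬ j ≤ right),
      pvSeg_nil arr j (right + 1) (by omega)]
  | succ n ih =>
    rw [pvMrg, dif_neg (by omega : ¬ i ≤ mid), dif_pos (by omega : j ≤ right),
      pvSeg_cons arr j (right + 1) (by omega), ih (j + 1) (by omega)]

theorem pvMrg_lo (arr : List Int) (mid right : Int) : ∀ (i j : Int), right < j →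
    pvMrg arr mid right i j = pvSeg arr i (mid + 1) := by
  intro i j hrj
  generalize hn : (mid + 1 - i).toNat = n
  induction n generalizing i with
  | zero =>
    rw [pvMrg, dif_neg (by omega : ¬ i ≤ mid), dif_neg (by omega : ¬ j ≤ right),
      pvSeg_nil arr i (mid + 1) (by omega)]
  | succ n ih =>
    rw [pvMrg, dif_pos (by omega : i ≤ mid), dif_neg (by omega : ¬ j ≤ right),
      pvSeg_cons arr i (mid + 1) (by omega), ih (i + 1) (by omega)]

theorem pvMrg_length (arr : List Int) (mid right : Int) : ∀ (i j : Int), i ≤ mid + 1 → j ≤ right + 1 →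
    ((pvMrg arr mid right i j).length : Int) = (mid + 1 - i) + (right + 1 - j) := by
  intro i j hi hj
  generalize hn : ((mid + 1 - i).toNat + (right + 1 - j).toNat) = n
  induction n generalizing i j with
  | zero =>
    rw [pvMrg, dif_neg (by omega : ¬ i ≤ mid), dif_neg (by omega : ¬ j ≤ right)]
    simp; omega
  | succ n ih =>
    rcases Decidable.em (i ≤ mid) with hi' | hi'
    · rcases Decidable.em (j ≤ right) with hj' | hj'
      · rw [pvMrg, dif_pos hi', dif_pos hj']
        rcases Decidable.em (PySem.List.pyGetD arr i 0 ≤ PySem.List.pyGetD arr j 0) with hc | hc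
        · rw [if_pos hc]
          have := ih (i + 1) j (by omega) (by omega) (by omega)
          simp_all; omega
        · rw [if_neg hc]
          have := ih i (j + 1) (by omega) (by omega) (by omega)
          simp_all; omega
      · rw [pvMrg, dif_pos hi', dif_neg hj']
        have := ih (i + 1) j (by omega) (by omega) (by omega)
        simp_all; omega
    · rcases Decidable.em (j ≤ right) with hj' | hj'
      · rw [pvMrg, dif_neg hi']
        rw [dif_pos hj']
        have := ih i (j + 1) (by omega) (by omega) (by omega)
        simp_all; omega
      · rw [pvMrg, dif_neg hi', dif_neg hj']
        simp; omega

-- ---- loop 3 ----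
theorem pvL3_trig (arr : List Int) (right l : Int) : ∀ (j k sc : Int) (temp : List Int),
    j ≤ right + 1 → sc < l → l ≤ sc + (right + 1 - j) →
    ∃ t, pvA_loop3 ((right + 1 - j).toNat) arr temp right l j k sc = (t, true, l) := by
  intro j k sc temp hj hscl hl
  generalize hn : (right + 1 - j).toNat = n
  induction n generalizing j k sc temp with
  | zero => omega
  | succ n ih =>
    simp only [pvA_loop3]
    rw [if_pos (by omega : j ≤ right)]
    rcases Decidable.em (sc + 1 = l) with he | he
    · rw [if_pos he]; exact ⟨_, by rw [he]⟩
    · rw [if_neg he]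
      exact ih (j + 1) (k + 1) (sc + 1) _ (by omega) (by omega) (by omega) (by omega)

theorem pvL3_comp (arr : List Int) (right l : Int) : ∀ (j k sc : Int) (temp : List Int),
    j ≤ right + 1 → ¬(sc < l ∧ l ≤ sc + (right + 1 - j)) →
    pvA_loop3 ((right + 1 - j).toNat) arr temp right l j k sc =
      (pvWr temp k (pvSeg arr j (right + 1)), false, sc + (right + 1 - j)) := by
  intro j k sc temp hj hnt
  generalize hn : (right + 1 - j).toNat = n
  induction n generalizing j k sc temp with
  | zero =>
    simp only [pvA_loop3]
    rw [pvSeg_nil arr j (right + 1) (by omega)]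
    simp [pvWr]; omega
  | succ n ih =>
    simp only [pvA_loop3]
    rw [if_pos (by omega : j ≤ right), if_neg (by omega : ¬ sc + 1 = l),
      ih (j + 1) (k + 1) (sc + 1) _ (by omega) (by omega) (by omega),
      pvSeg_cons arr j (right + 1) (by omega)]
    simp [pvWr]; omega

-- ---- loop 2 (falls through to loop 3) ----
theorem pvL2_trig (arr : List Int) (mid right l : Int) : ∀ (i j k sc : Int) (temp : List Int),
    i ≤ mid + 1 → j ≤ right + 1 → sc < l → l ≤ sc + (mid + 1 - i) + (right + 1 - j) →
    ∃ t, pvA_loop2 ((mid + 1 - i).toNat) arr temp mid right l i j k sc = (t, true, l) := by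
  intro i j k sc temp hi hj hscl hl
  generalize hn : (mid + 1 - i).toNat = n
  induction n generalizing i k sc temp with
  | zero =>
    simp only [pvA_loop2]
    exact pvL3_trig arr right l j k sc temp hj hscl (by omega)
  | succ n ih =>
    simp only [pvA_loop2]
    rw [if_pos (by omega : i ≤ mid)]
    rcases Decidable.em (sc + 1 = l) with he | he
    · rw [if_pos he]; exact ⟨_, by rw [he]⟩
    · rw [if_neg he]
      exact ih (i + 1) (k + 1) (sc + 1) _ (by omega) (by omega) (by omega) (by omega)

theorem pvL2_comp (arr : List Int) (mid right l : Int) : ∀ (i j k sc : Int) (temp : List Int),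
    i ≤ mid + 1 → j ≤ right + 1 → ¬(sc < l ∧ l ≤ sc + (mid + 1 - i) + (right + 1 - j)) →
    pvA_loop2 ((mid + 1 - i).toNat) arr temp mid right l i j k sc =
      (pvWr temp k (pvSeg arr i (mid + 1) ++ pvSeg arr j (right + 1)), false,
       sc + (mid + 1 - i) + (right + 1 - j)) := by
  intro i j k sc temp hi hj hnt
  generalize hn : (mid + 1 - i).toNat = n
  induction n generalizing i k sc temp with
  | zero =>
    simp only [pvA_loop2]
    rw [pvSeg_nil arr i (mid + 1) (by omega),
      pvL3_comp arr right l j k sc temp hj (by omega)]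
    simp; omega
  | succ n ih =>
    simp only [pvA_loop2]
    rw [if_pos (by omega : i ≤ mid), if_neg (by omega : ¬ sc + 1 = l),
      ih (i + 1) (k + 1) (sc + 1) _ (by omega) (by omega) (by omega),
      pvSeg_cons arr i (mid + 1) (by omega)]
    simp [pvWr]; omega

-- ---- loop 1 (falls through to loop 2) ----
theorem pvL1_trig (arr : List Int) (mid right l : Int) : ∀ (n : ℕ) (i j k sc : Int) (temp : List Int),
    ((mid + 1 - i) + (right + 1 - j)).toNat = n →
    i ≤ mid + 1 → j ≤ right + 1 → sc < l → l ≤ sc + (mid + 1 - i) + (right + 1 - j) →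
    ∃ t, pvA_loop1 n arr temp mid right l i j k sc = (t, true, l) := by
  intro n
  induction n using Nat.strong_induction_on with
  | _ n ih =>
    intro i j k sc temp hn hi hj hscl hl
    rcases Decidable.em (i ≤ mid ∧ j ≤ right) with hc | hc
    · obtain ⟨n', rfl⟩ : ∃ m, n = m + 1 := ⟨n - 1, by omega⟩
      simp only [pvA_loop1]
      rw [if_pos hc]
      rcases Decidable.em (PySem.List.pyGetD arr i 0 ≤ PySem.List.pyGetD arr j 0) with hcmp | hcmp
      · rw [if_pos hcmp]
        rcases Decidable.em (sc + 1 = l) with he | he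
        · rw [if_pos he]; exact ⟨_, by rw [he]⟩
        · rw [if_neg he]
          exact ih _ (by omega) (i + 1) j (k + 1) (sc + 1) _ (by omega) (by omega) (by omega) (by omega) (by omega)
      · rw [if_neg hcmp]
        rcases Decidable.em (sc + 1 = l) with he | he
        · rw [if_pos he]; exact ⟨_, by rw [he]⟩
        · rw [if_neg he]
          exact ih _ (by omega) i (j + 1) (k + 1) (sc + 1) _ (by omega) (by omega) (by omega) (by omega) (by omega)
    · have hfall : pvA_loop1 n arr temp mid right l i j k sc =
          pvA_loop2 ((mid + 1 - i).toNat) arr temp mid right l i j k sc := by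
        rcases n with _ | n
        · simp only [pvA_loop1]
        · simp only [pvA_loop1]; rw [if_neg hc]
      rw [hfall]
      exact pvL2_trig arr mid right l i j k sc temp hi hj hscl hl

theorem pvL1_comp (arr : List Int) (mid right l : Int) : ∀ (n : ℕ) (i j k sc : Int) (temp : List Int),
    ((mid + 1 - i) + (right + 1 - j)).toNat = n →
    i ≤ mid + 1 → j ≤ right + 1 → ¬(sc < l ∧ l ≤ sc + (mid + 1 - i) + (right + 1 - j)) →
    pvA_loop1 n arr temp mid right l i j k sc =
      (pvWr temp k (pvMrg arr mid right i j), false, sc + (mid + 1 - i) + (right + 1 - j)) := by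
  intro n
  induction n using Nat.strong_induction_on with
  | _ n ih =>
    intro i j k sc temp hn hi hj hnt
    rcases Decidable.em (i ≤ mid ∧ j ≤ right) with hc | hc
    · obtain ⟨n', rfl⟩ : ∃ m, n = m + 1 := ⟨n - 1, by omega⟩
      simp only [pvA_loop1]
      rw [if_pos hc]
      rcases Decidable.em (PySem.List.pyGetD arr i 0 ≤ PySem.List.pyGetD arr j 0) with hcmp | hcmp
      · rw [if_pos hcmp, if_neg (by omega : ¬ sc + 1 = l),
          ih _ (by omega) (i + 1) j (k + 1) (sc + 1) _ (by omega) (by omega) (by omega) (by omega)]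
        conv_rhs => rw [pvMrg, dif_pos hc.1, dif_pos hc.2, if_pos hcmp]
        simp [pvWr]; omega
      · rw [if_neg hcmp, if_neg (by omega : ¬ sc + 1 = l),
          ih _ (by omega) i (j + 1) (k + 1) (sc + 1) _ (by omega) (by omega) (by omega) (by omega)]
        conv_rhs => rw [pvMrg, dif_pos hc.1, dif_pos hc.2, if_neg hcmp]
        simp [pvWr]; omega
    · have hfall : pvA_loop1 n arr temp mid right l i j k sc =
          pvA_loop2 ((mid + 1 - i).toNat) arr temp mid right l i j k sc := by
        rcases n with _ | n
        · simp only [pvA_loop1]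
        · simp only [pvA_loop1]; rw [if_neg hc]
      rw [hfall, pvL2_comp arr mid right l i j k sc temp hi hj hnt]
      rcases Decidable.em (i ≤ mid) with hi' | hi'
      · have hj' : ¬ j ≤ right := fun h => hc ⟨hi', h⟩
        rw [pvMrg_lo arr mid right i j (by omega), pvSeg_nil arr j (right + 1) (by omega)]
        simp
      · rw [pvMrg_hi arr mid right i j (by omega), pvSeg_nil arr i (mid + 1) (by omega)]
        simp

-- ---- merge_kth_element, characterized ----
theorem pvMerge_trig (arr temp : List Int) (left mid right l s : Int)
    (hlm : left ≤ mid) (hmr : mid < right) (h1 : s < l) (h2 : l ≤ s + (right - left + 1)) :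
    ∃ t, pvA_merge arr temp left mid right l s = (arr, t, true, l) := by
  obtain ⟨t, ht⟩ := pvL1_trig arr mid right l (((mid + 1 - left) + (right - mid)).toNat)
    left (mid + 1) left s temp (by omega) (by omega) (by omega) h1 (by omega)
  exact ⟨t, by rw [pvA_merge, ht]⟩

theorem pvMerge_comp (arr temp : List Int) (left mid right l s : Int)
    (hlm : left ≤ mid) (hmr : mid < right) (hnt : ¬(s < l ∧ l ≤ s + (right - left + 1))) :
    pvA_merge arr temp left mid right l s =
      (pvA_copyback arr (pvWr temp left (pvMrg arr mid right left (mid + 1))) left right,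
       pvWr temp left (pvMrg arr mid right left (mid + 1)), false, s + (right - left + 1)) := by
  rw [pvA_merge, pvL1_comp arr mid right l (((mid + 1 - left) + (right - mid)).toNat)
    left (mid + 1) left s temp (by omega) (by omega) (by omega) (by omega)]
  simp only [Prod.mk.injEq, true_and]
  omega

-- ---- length preservation ----
theorem pvL3_len (arr : List Int) (right l : Int) : ∀ (fuel : ℕ) (j k sc : Int) (temp : List Int),
    (pvA_loop3 fuel arr temp right l j k sc).1.length = temp.length := by
  intro fuel
  induction fuel with
  | zero => intro j k sc temp; rfl
  | succ n ih =>
    intro j k sc temp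
    simp only [pvA_loop3]
    rcases Decidable.em (j ≤ right) with hj | hj
    · rw [if_pos hj]
      rcases Decidable.em (sc + 1 = l) with he | he
      · rw [if_pos he]; simp [PySem.List.length_pySetD]
      · rw [if_neg he, ih (j + 1) (k + 1) (sc + 1)]
        simp [PySem.List.length_pySetD]
    · rw [if_neg hj]

theorem pvL2_len (arr : List Int) (mid right l : Int) : ∀ (fuel : ℕ) (i j k sc : Int) (temp : List Int),
    (pvA_loop2 fuel arr temp mid right l i j k sc).1.length = temp.length := by
  intro fuel
  induction fuel with
  | zero => intro i j k sc temp; simp only [pvA_loop2]; exact pvL3_len arr right l _ j k sc temp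
  | succ n ih =>
    intro i j k sc temp
    simp only [pvA_loop2]
    rcases Decidable.em (i ≤ mid) with hi | hi
    · rw [if_pos hi]
      rcases Decidable.em (sc + 1 = l) with he | he
      · rw [if_pos he]; simp [PySem.List.length_pySetD]
      · rw [if_neg he, ih (i + 1) j (k + 1) (sc + 1)]
        simp [PySem.List.length_pySetD]
    · rw [if_neg hi]
      exact pvL3_len arr right l _ j k sc temp

theorem pvL1_len (arr : List Int) (mid right l : Int) : ∀ (fuel : ℕ) (i j k sc : Int) (temp : List Int),
    (pvA_loop1 fuel arr temp mid right l i j k sc).1.length = temp.length := by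
  intro fuel
  induction fuel with
  | zero => intro i j k sc temp; simp only [pvA_loop1]; exact pvL2_len arr mid right l _ i j k sc temp
  | succ n ih =>
    intro i j k sc temp
    simp only [pvA_loop1]
    rcases Decidable.em (i ≤ mid ∧ j ≤ right) with hc | hc
    · rw [if_pos hc]
      rcases Decidable.em (PySem.List.pyGetD arr i 0 ≤ PySem.List.pyGetD arr j 0) with hcmp | hcmp
      · rcases Decidable.em (sc + 1 = l) with he | he
        · rw [if_pos hcmp, if_pos he]; simp [PySem.List.length_pySetD]
        · rw [if_pos hcmp, if_neg he, ih (i + 1) j (k + 1) (sc + 1)]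
          simp [PySem.List.length_pySetD]
      · rcases Decidable.em (sc + 1 = l) with he | he
        · rw [if_neg hcmp, if_pos he]; simp [PySem.List.length_pySetD]
        · rw [if_neg hcmp, if_neg he, ih i (j + 1) (k + 1) (sc + 1)]
          simp [PySem.List.length_pySetD]
    · rw [if_neg hc]
      exact pvL2_len arr mid right l _ i j k sc temp

theorem pvFoldSet_len (g : Int → Int) : ∀ (is : List Int) (a : List Int),
    (is.foldl (fun a i => PySem.List.pySetD a i (g i)) a).length = a.length := by
  intro is
  induction is with
  | nil => intro a; rfl
  | cons x xs ih => intro a; rw [List.foldl_cons, ih]; simp [PySem.List.length_pySetD]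

theorem pvCopyback_len (arr temp : List Int) (left right : Int) :
    (pvA_copyback arr temp left right).length = arr.length :=
  pvFoldSet_len _ _ arr

theorem pvMerge_len (arr temp : List Int) (left mid right l s : Int) :
    (pvA_merge arr temp left mid right l s).1.length = arr.length ∧
    (pvA_merge arr temp left mid right l s).2.1.length = temp.length := by
  rw [pvA_merge]
  rcases h : pvA_loop1 (((mid + 1 - left) + (right - mid)).toNat) arr temp mid right l left (mid + 1) left s with ⟨t1, d1, s1⟩
  have hlen : t1.length = temp.length := by
    have := pvL1_len arr mid right l (((mid + 1 - left) + (right - mid)).toNat) left (mid + 1) left s temp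
    rw [h] at this; exact this
  cases d1 <;> simp [hlen, pvCopyback_len]

theorem pvA_ms_len : ∀ (fuel : ℕ) (left right : Int) (arr temp : List Int) (l sc : Int),
    (pvA_ms fuel arr temp left right l sc).1.length = arr.length ∧
    (pvA_ms fuel arr temp left right l sc).2.1.length = temp.length := by
  intro fuel
  induction fuel with
  | zero => intro left right arr temp l sc; exact ⟨rfl, rfl⟩
  | succ n ih =>
    intro left right arr temp l sc
    rcases Decidable.em (left < right) with hlt | hlt
    · simp only [pvA_ms]
      rw [if_pos hlt]
      rcases h1 : pvA_ms n arr temp left (PySem.Int.floordiv (left + right) 2) l sc with ⟨a1, t1, d1, s1⟩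
      have hl1 := ih left (PySem.Int.floordiv (left + right) 2) arr temp l sc
      rw [h1] at hl1
      cases d1 with
      | true => simpa using hl1
      | false =>
        simp only []
        rcases h2 : pvA_ms n a1 t1 (PySem.Int.floordiv (left + right) 2 + 1) right l s1 with ⟨a2, t2, d2, s2⟩
        have hl2 := ih (PySem.Int.floordiv (left + right) 2 + 1) right a1 t1 l s1
        rw [h2] at hl2
        simp at hl1 hl2
        cases d2 with
        | true => simp; omega
        | false =>
          simp only []
          have := pvMerge_len a2 t2 left (PySem.Int.floordiv (left + right) 2) right l s2
          simp at this ⊢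
          omega
    · simp only [pvA_ms]
      rw [if_neg hlt]
      exact ⟨rfl, rfl⟩

theorem pvSet_take_succ (xs : List Int) (n : ℕ) (a : Int) (h : n < xs.length) :
    (xs.set n a).take (n + 1) = xs.take n ++ [a] := by
  apply List.ext_getElem
  · simp; omega
  · intro i h1 h2
    simp only [List.getElem_take, List.getElem_set]
    rcases Decidable.em (n = i) with he | he
    · subst he; simp [List.getElem_append_right, List.length_take, Nat.min_eq_left (Nat.le_of_lt h)]
    · have hi : i < n := by simp at h1; omega
      rw [if_neg he, List.getElem_append_left (by simp; omega)]
      simp [List.getElem_take]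

theorem pvSet_drop_of_lt (xs : List Int) (n m : ℕ) (a : Int) (h : n < m) :
    (xs.set n a).drop m = xs.drop m := by
  apply List.ext_getElem
  · simp
  · intro i h1 h2
    simp only [List.getElem_drop, List.getElem_set]
    rw [if_neg (by omega)]

-- pvWr writes xs as a contiguous block
theorem pvWr_char (xs : List Int) : ∀ (temp : List Int) (k : Int), 0 ≤ k →
    k.toNat + xs.length ≤ temp.length →
    pvWr temp k xs = temp.take k.toNat ++ xs ++ temp.drop (k.toNat + xs.length) := by
  induction xs with
  | nil => intro temp k _ _; simp [pvWr]
  | cons x xs ih =>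
    intro temp k hk hlen
    have hset : PySem.List.pySetD temp k x = temp.set k.toNat x :=
      PySem.List.pySetD_of_nonneg _ _ hk
    rw [pvWr, hset, ih _ (k + 1) (by omega) (by simp at hlen ⊢; omega)]
    have h1 : (k + 1).toNat = k.toNat + 1 := by omega
    rw [h1, pvSet_take_succ temp k.toNat x (by simp at hlen; omega),
      pvSet_drop_of_lt temp k.toNat (k.toNat + 1 + xs.length) x (by omega)]
    simp only [List.append_assoc, List.singleton_append]
    have : k.toNat + 1 + xs.length = k.toNat + (x :: xs).length := by simp; omega
    rw [this]

-- the element-wise segment is a drop/take slice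
theorem pvSeg_eq (arr : List Int) (u v : Int) (hu : 0 ≤ u) (huv : u ≤ v) (hv : v ≤ (arr.length : Int)) :
    pvSeg arr u v = (arr.drop u.toNat).take (v - u).toNat := by
  apply List.ext_getElem
  · rw [pvSeg_length]; simp; omega
  · intro i h1 h2
    have hlen : i < (v - u).toNat := by rw [pvSeg_length] at h1; omega
    simp only [pvSeg, List.getElem_map, PySem.List.getElem_pyRange_one, List.getElem_take,
      List.getElem_drop]
    have hget := PySem.List.pyGetD_eq_getElem (xs := arr) (i := u + (i : Int)) (d := 0)
      (by omega) (by omega)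
    rw [hget]
    congr 1
    omega

-- a Python slice with in-range nonnegative bounds is that segment
theorem pvSlice_seg (arr : List Int) (u v : Int) (hu : 0 ≤ u) (huv : u ≤ v) (hv : v ≤ (arr.length : Int)) :
    PySem.List.slice arr (some u) (some v) = pvSeg arr u v := by
  rw [PySem.List.slice_toNat _ hu (by omega), pvSeg_eq arr u v hu huv hv]
  congr 1
  omega

-- the copy-back loop replaces arr[left..right] by temp[left..right]
theorem pvCopyback_char (temp : List Int) (right : Int) : ∀ (left : Int) (arr : List Int),
    0 ≤ left → left ≤ right + 1 → right < (arr.length : Int) → right < (temp.length : Int) →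
    pvA_copyback arr temp left right =
      arr.take left.toNat ++ pvSeg temp left (right + 1) ++ arr.drop (right + 1).toNat := by
  intro left arr
  generalize hn : (right + 1 - left).toNat = n
  induction n generalizing left arr with
  | zero =>
    intro h0 h1 h2 h3
    have hl : left = right + 1 := by omega
    subst hl
    rw [pvA_copyback, PySem.List.pyRange_one_eq_nil (by omega), List.foldl_nil,
      pvSeg_nil temp _ _ (by omega)]
    simp
  | succ n ih =>
    intro h0 h1 h2 h3
    have hlr : left ≤ right := by omega
    rw [pvA_copyback, PySem.List.pyRange_one_cons (by omega), List.foldl_cons]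
    have hset : PySem.List.pySetD arr left (PySem.List.pyGetD temp left 0) =
        arr.set left.toNat (PySem.List.pyGetD temp left 0) := PySem.List.pySetD_of_nonneg _ _ h0
    rw [hset]
    have := ih (left + 1) (arr.set left.toNat (PySem.List.pyGetD temp left 0))
      (by omega) (by omega) (by omega) (by simp; omega) (by omega)
    rw [pvA_copyback] at this
    rw [this, pvSeg_cons temp left (right + 1) (by omega)]
    have ht : (left + 1).toNat = left.toNat + 1 := by omega
    rw [ht, pvSet_take_succ arr left.toNat _ (by omega),
      pvSet_drop_of_lt arr left.toNat (right + 1).toNat _ (by omega)]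
    simp

-- ---- B's merge loop produces the same merged run ----
theorem pvSeg_get (arr : List Int) (u v t : Int) (hu : 0 ≤ u) (ht : 0 ≤ t) (htv : u + t < v) :
    PySem.List.pyGetD (pvSeg arr u v) t 0 = PySem.List.pyGetD arr (u + t) 0 := by
  have hget := PySem.List.pyGetD_eq_getElem (xs := pvSeg arr u v) (i := t) (d := 0) ht
    (by rw [pvSeg_length]; omega)
  rw [hget]
  simp only [pvSeg, List.getElem_map, PySem.List.getElem_pyRange_one]
  congr 1
  omega

theorem pvSeg_drop (arr : List Int) (u v t : Int) (ht : 0 ≤ t) :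
    (pvSeg arr u v).drop t.toNat = pvSeg arr (u + t) v := by
  apply List.ext_getElem
  · simp [pvSeg_length]; omega
  · intro i h1 h2
    simp only [List.getElem_drop, pvSeg, List.getElem_map, PySem.List.getElem_pyRange_one]
    congr 1
    omega

-- exit state of the merge loop: the leftovers of one side
theorem pvB_mergeExit (arr : List Int) (left mid right : Int)
    (hlm : left ≤ mid + 1) (hmr : mid ≤ right)
    (a b : Int) (acc : List Int) (ha : 0 ≤ a) (hb : 0 ≤ b)
    (hex : ¬(a < ((pvSeg arr left (mid + 1)).length : Int) ∧
             b < ((pvSeg arr (mid + 1) (right + 1)).length : Int))) :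
    acc ++ PySem.List.slice (pvSeg arr left (mid + 1)) (some a) none
        ++ PySem.List.slice (pvSeg arr (mid + 1) (right + 1)) (some b) none
      = acc ++ pvMrg arr mid right (left + a) (mid + 1 + b) := by
  have hLlen : ((pvSeg arr left (mid + 1)).length : Int) = mid + 1 - left := by
    rw [pvSeg_length]; omega
  have hRlen : ((pvSeg arr (mid + 1) (right + 1)).length : Int) = right - mid := by
    rw [pvSeg_length]; omega
  rw [PySem.List.slice_from _ ha, PySem.List.slice_from _ hb,
    pvSeg_drop arr left (mid + 1) a ha, pvSeg_drop arr (mid + 1) (right + 1) b hb]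
  rcases Decidable.em (a < ((pvSeg arr left (mid + 1)).length : Int)) with ha' | ha'
  · have hb' : ¬ b < ((pvSeg arr (mid + 1) (right + 1)).length : Int) := fun h => hex ⟨ha', h⟩
    rw [pvMrg_lo arr mid right (left + a) (mid + 1 + b) (by omega),
      pvSeg_nil arr (mid + 1 + b) (right + 1) (by omega)]
    simp
  · rw [pvMrg_hi arr mid right (left + a) (mid + 1 + b) (by omega),
      pvSeg_nil arr (left + a) (mid + 1) (by omega)]
    simp

theorem pvB_mergeLoop_eq (arr : List Int) (left mid right : Int)
    (h0 : 0 ≤ left) (hlm : left ≤ mid + 1) (hmr : mid ≤ right) (hlen : right < (arr.length : Int)) :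
    ∀ (n : ℕ) (a b : Int) (acc : List Int), 0 ≤ a → 0 ≤ b →
    ((mid + 1 - left - a) + (right - mid - b)).toNat = n →
    pvB_mergeLoop n (pvSeg arr left (mid + 1)) (pvSeg arr (mid + 1) (right + 1)) a b acc
      = acc ++ pvMrg arr mid right (left + a) (mid + 1 + b) := by
  have hLlen : ((pvSeg arr left (mid + 1)).length : Int) = mid + 1 - left := by
    rw [pvSeg_length]; omega
  have hRlen : ((pvSeg arr (mid + 1) (right + 1)).length : Int) = right - mid := by
    rw [pvSeg_length]; omega
  intro n
  induction n with
  | zero =>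
    intro a b acc ha hb hn
    simp only [pvB_mergeLoop]
    exact pvB_mergeExit arr left mid right hlm hmr a b acc ha hb (by
      intro hcc
      omega)
  | succ n ih =>
    intro a b acc ha hb hn
    simp only [pvB_mergeLoop]
    rcases Decidable.em (a < ((pvSeg arr left (mid + 1)).length : Int) ∧
        b < ((pvSeg arr (mid + 1) (right + 1)).length : Int)) with hc | hc
    · have hia : left + a ≤ mid := by omega
      have hib : mid + 1 + b ≤ right := by omega
      rw [if_pos hc, pvSeg_get arr left (mid + 1) a h0 ha (by omega),
        pvSeg_get arr (mid + 1) (right + 1) b (by omega) hb (by omega)]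
      rcases Decidable.em (PySem.List.pyGetD arr (left + a) 0 ≤ PySem.List.pyGetD arr (mid + 1 + b) 0) with hcmp | hcmp
      · rw [if_pos hcmp, ih (a + 1) b _ (by omega) hb (by omega)]
        conv_rhs => rw [pvMrg, dif_pos hia, dif_pos hib, if_pos hcmp]
        rw [show left + (a + 1) = left + a + 1 from by ring]
        simp [List.append_assoc]
      · rw [if_neg hcmp, ih a (b + 1) _ ha (by omega) (by omega)]
        conv_rhs => rw [pvMrg, dif_pos hia, dif_pos hib, if_neg hcmp]
        rw [show mid + 1 + (b + 1) = mid + 1 + b + 1 from by ring]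
        simp [List.append_assoc]
    · rw [if_neg hc]
      exact pvB_mergeExit arr left mid right hlm hmr a b acc ha hb hc

-- ---- slice assignment vs copy-back ----
theorem pvB_splice_eq (arr merged : List Int) (lo hi : Int) (h0 : 0 ≤ lo) (hh : 0 ≤ hi + 1) :
    pvB_splice arr lo hi merged = arr.take lo.toNat ++ merged ++ arr.drop (hi + 1).toNat := by
  rw [pvB_splice, PySem.List.slice_to _ h0, PySem.List.slice_from _ hh]

theorem pvMergeback (arr temp M : List Int) (left right : Int)
    (h0 : 0 ≤ left) (hM : (M.length : Int) = right + 1 - left)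
    (hA : right < (arr.length : Int)) (hT : right < (temp.length : Int)) :
    pvA_copyback arr (pvWr temp left M) left right =
      arr.take left.toNat ++ M ++ arr.drop (right + 1).toNat := by
  rw [pvCopyback_char (pvWr temp left M) right left arr h0 (by omega) hA
    (by rw [pvWr_length]; omega)]
  congr 1
  congr 1
  rw [pvSeg_eq (pvWr temp left M) left (right + 1) h0 (by omega) (by rw [pvWr_length]; omega),
    pvWr_char M temp left h0 (by omega)]
  set T := temp.take left.toNat with hT1
  have htake : T.length = left.toNat := by rw [hT1]; simp; omega
  rw [List.append_assoc, ← htake, List.drop_left,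
    show (right + 1 - left).toNat = M.length from by omega, List.take_left]

-- ---- fuel irrelevance for the driver (any fuel ≥ the stack weight) ----
theorem pvB_frameW_pos (f : Int × Int × Int × Int) : 1 ≤ pvB_frameW f := by
  unfold pvB_frameW
  split
  · exact Nat.one_le_pow _ _ (by norm_num)
  · exact le_rfl

theorem pvB_stackW_cons (f : Int × Int × Int × Int) (rest : List (Int × Int × Int × Int)) :
    pvB_stackW (f :: rest) = pvB_frameW f + pvB_stackW rest := by
  simp [pvB_stackW]

theorem pvB_run_irrel (l : Int) : ∀ (f1 : ℕ) (stack : List (Int × Int × Int × Int)) (f2 : ℕ)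
    (arr : List Int) (sc : Int), pvB_stackW stack ≤ f1 → pvB_stackW stack ≤ f2 →
    pvB_run f1 arr l sc stack = pvB_run f2 arr l sc stack := by
  intro f1
  induction f1 using Nat.strong_induction_on with
  | _ f1 ih =>
    intro stack f2 arr sc h1 h2
    match stack with
    | [] => simp only [pvB_run]
    | (kind, lo, hi, mid) :: rest =>
      have hfw := pvB_frameW_pos (kind, lo, hi, mid)
      rw [pvB_stackW_cons] at h1 h2
      obtain ⟨g1, rfl⟩ : ∃ g, f1 = g + 1 := ⟨f1 - 1, by omega⟩
      obtain ⟨g2, rfl⟩ : ∃ g, f2 = g + 1 := ⟨f2 - 1, by omega⟩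
      simp only [pvB_run]
      rcases Decidable.em (kind = 0) with hk | hk
      · rw [if_pos hk, if_pos hk]
        subst hk
        have hfw0 : pvB_frameW (0, lo, hi, mid) = pvB_frameW ((0 : Int), lo, hi, (0 : Int)) := by
          simp [pvB_frameW]
        rcases Decidable.em (lo < hi) with hlt | hlt
        · rw [if_pos hlt, if_pos hlt]
          have hmid := pvA_mid_lt lo hi hlt
          have hcall := pvB_stackW_call lo hi (PySem.Int.floordiv (lo + hi) 2) hlt hmid.1 hmid.2
          apply ih g1 (by omega)
          · simp only [pvB_stackW_cons]; omega
          · simp only [pvB_stackW_cons]; omega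
        · rw [if_neg hlt, if_neg hlt]
          exact ih g1 (by omega) rest g2 arr sc (by omega) (by omega)
      · rw [if_neg hk, if_neg hk]
        have hfk : pvB_frameW (kind, lo, hi, mid) = 1 := by simp [pvB_frameW, hk]
        rcases Decidable.em (sc < l ∧ l ≤ sc + (hi - lo + 1)) with htr | htr
        · rw [if_pos htr, if_pos htr]
        · rw [if_neg htr, if_neg htr]
          exact ih g1 (by omega) rest g2 _ _ (by omega) (by omega)

-- ---- the stack driver simulates the recursion ----
theorem pvSim (l : Int) : ∀ (n : ℕ) (left right : Int), (right - left).toNat = n →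
    ∀ (arr temp : List Int) (sc : Int) (rest : List (Int × Int × Int × Int)) (fa fb : ℕ),
    n ≤ fa → pvB_stackW ((0, left, right, 0) :: rest) ≤ fb →
    (left < right → 0 ≤ left ∧ right < (arr.length : Int) ∧ right < (temp.length : Int)) →
    pvB_run fb arr l sc ((0, left, right, 0) :: rest) =
      (match pvA_ms fa arr temp left right l sc with
       | (a, _, true, s) => (a, true, s)
       | (a, _, false, s) => pvB_run fb a l s rest) := by
  intro n
  induction n using Nat.strong_induction_on with
  | _ n ih =>
    intro left right hn arr temp sc rest fa fb hfa hfb hb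
    have hfw : pvB_frameW ((0 : Int), left, right, (0 : Int)) = 4 ^ ((right - left).toNat + 1) := by
      simp [pvB_frameW]
    rw [pvB_stackW_cons, hfw] at hfb
    have hp1 : 1 ≤ (4:ℕ) ^ ((right - left).toNat + 1) := Nat.one_le_pow _ _ (by norm_num)
    obtain ⟨gb, rfl⟩ : ∃ g, fb = g + 1 := ⟨fb - 1, by omega⟩
    rcases Decidable.em (left < right) with hlt | hlt
    · obtain ⟨hbl, hbar, hbt⟩ := hb hlt
      have hmid := pvA_mid_lt left right hlt
      obtain ⟨ga, rfl⟩ : ∃ g, fa = g + 1 := ⟨fa - 1, by omega⟩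
      have hp2 : (16:ℕ) ≤ 4 ^ ((right - left).toNat + 1) := by
        calc (16:ℕ) = 4 ^ 2 := by norm_num
        _ ≤ 4 ^ ((right - left).toNat + 1) := Nat.pow_le_pow_right (by norm_num) (by omega)
      simp only [pvB_run]
      rw [if_true, if_pos hlt]
      simp only [pvA_ms]
      rw [if_pos hlt]
      have hw1 : pvB_stackW ((0, left, PySem.Int.floordiv (left + right) 2, 0)
          :: (0, PySem.Int.floordiv (left + right) 2 + 1, right, 0)
          :: (1, left, right, PySem.Int.floordiv (left + right) 2) :: rest) ≤ gb := by
        have hcall := pvB_stackW_call left right (PySem.Int.floordiv (left + right) 2) hlt hmid.1 hmid.2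
        simp only [pvB_stackW_cons] at *
        rw [hfw] at hcall
        omega
      rw [ih (PySem.Int.floordiv (left + right) 2 - left).toNat (by omega) left
        (PySem.Int.floordiv (left + right) 2) rfl arr temp sc _ ga gb (by omega) hw1
        (fun _ => ⟨hbl, by omega, by omega⟩)]
      rcases h1 : pvA_ms ga arr temp left (PySem.Int.floordiv (left + right) 2) l sc with ⟨a1, t1, d1, s1⟩
      have hlen1 := pvA_ms_len ga left (PySem.Int.floordiv (left + right) 2) arr temp l sc
      rw [h1] at hlen1
      simp at hlen1
      cases d1 with
      | true => rfl
      | false =>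
        simp only []
        have hw2 : pvB_stackW ((0, PySem.Int.floordiv (left + right) 2 + 1, right, 0)
            :: (1, left, right, PySem.Int.floordiv (left + right) 2) :: rest) ≤ gb := by
          have h := pvB_frameW_pos ((0 : Int), left, PySem.Int.floordiv (left + right) 2, (0 : Int))
          simp only [pvB_stackW_cons] at hw1 ⊢
          omega
        rw [ih (right - (PySem.Int.floordiv (left + right) 2 + 1)).toNat (by omega)
          (PySem.Int.floordiv (left + right) 2 + 1) right rfl a1 t1 s1 _ ga gb (by omega) hw2
          (fun _ => ⟨by omega, by omega, by omega⟩)]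
        rcases h2 : pvA_ms ga a1 t1 (PySem.Int.floordiv (left + right) 2 + 1) right l s1 with ⟨a2, t2, d2, s2⟩
        have hlen2 := pvA_ms_len ga (PySem.Int.floordiv (left + right) 2 + 1) right a1 t1 l s1
        rw [h2] at hlen2
        simp at hlen2
        cases d2 with
        | true => rfl
        | false =>
          simp only []
          have hwm : 1 ≤ gb := by
            have h := pvB_frameW_pos ((1 : Int), left, right, PySem.Int.floordiv (left + right) 2)
            simp only [pvB_stackW_cons] at hw2
            omega
          obtain ⟨gc, hgc⟩ : ∃ g, gb = g + 1 := ⟨gb - 1, by omega⟩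
          rw [hgc]
          simp only [pvB_run]
          rw [if_neg (show ¬ (1 : Int) = 0 by norm_num)]
          rw [pvSlice_seg a2 left (PySem.Int.floordiv (left + right) 2 + 1) (by omega) (by omega) (by omega),
            pvSlice_seg a2 (PySem.Int.floordiv (left + right) 2 + 1) (right + 1) (by omega) (by omega) (by omega)]
          rw [show (pvSeg a2 left (PySem.Int.floordiv (left + right) 2 + 1)).length
                + (pvSeg a2 (PySem.Int.floordiv (left + right) 2 + 1) (right + 1)).length
              = ((PySem.Int.floordiv (left + right) 2 + 1 - left - 0)
                + (right - PySem.Int.floordiv (left + right) 2 - 0)).toNat from by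
            rw [pvSeg_length, pvSeg_length]; omega]
          rw [show pvSeg a2 (PySem.Int.floordiv (left + right) 2 + 1) (right + 1)
              = pvSeg a2 (PySem.Int.floordiv (left + right) 2 + 1) (right + 1) from rfl]
          rw [pvB_mergeLoop_eq a2 left (PySem.Int.floordiv (left + right) 2) right hbl
            (by omega) (by omega) (by omega) _ 0 0 [] le_rfl le_rfl rfl]
          simp only [List.nil_append, add_zero]
          by_cases htr : s2 < l ∧ l ≤ s2 + (right - left + 1)
          · rw [if_pos htr]
            obtain ⟨t, ht⟩ := pvMerge_trig a2 t2 left (PySem.Int.floordiv (left + right) 2) right l s2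
              (by omega) (by omega) htr.1 htr.2
            rw [ht]
          · rw [if_neg htr,
              pvMerge_comp a2 t2 left (PySem.Int.floordiv (left + right) 2) right l s2
                (by omega) (by omega) htr]
            simp only []
            rw [pvB_splice_eq a2 _ left right hbl (by omega),
              pvMergeback a2 t2 _ left right hbl
                (by rw [pvMrg_length a2 (PySem.Int.floordiv (left + right) 2) right left
                    (PySem.Int.floordiv (left + right) 2 + 1) (by omega) (by omega)]; omega)
                (by omega) (by omega)]
            apply pvB_run_irrel
            · simp only [pvB_stackW_cons] at hw2
              have hfk : pvB_frameW ((1 : Int), left, right, PySem.Int.floordiv (left + right) 2) = 1 := by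
                simp [pvB_frameW]
              omega
            · omega
    · simp only [pvB_run]
      rw [if_true, if_neg hlt]
      have hbase : (match pvA_ms fa arr temp left right l sc with
          | (a, _, true, s) => (a, true, s)
          | (a, _, false, s) => pvB_run (gb + 1) a l s rest)
          = pvB_run (gb + 1) arr l sc rest := by
        rcases fa with _ | fa
        · rfl
        · simp only [pvA_ms]
          rw [if_neg hlt]
      rw [hbase]
      apply pvB_run_irrel
      · omega
      · omega

-- ===== VERDICT (by name: the statement is the Claim_ definition above) =====
theorem merge_sort_kth_element_spec : Claim_equal_merge_sort_kth_element := by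
  intro arr temp_arr left right l sc _hdom hpre
  unfold Spec_merge_sort_kth_element
  have hb : left < right → 0 ≤ left ∧ right < (arr.length : Int) ∧ right < (temp_arr.length : Int) := by
    intro hlt
    rcases hpre with h | h
    · omega
    · exact h
  rw [merge_sort_kth_element_alt, merge_sort_kth_element,
    pvSim l (right - left).toNat left right rfl arr temp_arr sc []
      ((right - left).toNat) (pvB_stackW [(0, left, right, 0)]) le_rfl le_rfl hb]
  rcases h : pvA_ms ((right - left).toNat) arr temp_arr left right l sc with ⟨a, t, d, s⟩
  cases d
  · simp only [pvB_run]
  · rfl
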